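-- pv_equiv track=rewrite | github.com/morsamatthias/ciscorouterscript | switchconfigurer.py | handle_ports
-- ===== SOURCE A (Python) =====
-- def handle_ports(ports, vlan_id, description, switch, is_management=False):
--     #switch starts at 0 but csv file could start at 1
--     switch = switch - 1
--     if switch < 0:
--         switch = 0
--     config_commands = []
--
--     # Split ports by commas
--     for port in ports.split(','):
--         if '-' in port:
--             # Handle range of ports (e.g., 1-4)
--             start_port, end_port = port.split('-')
--             config_commands.append(f"interface range FastEthernet {switch}/{start_port} - {end_port}")
--         else:
--             # Handle single port
--             config_commands.append(f"interface FastEthernet {switch}/{port}")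
--
--         # Handle trunk ports (based on description)
--         if 'trunk' in description.lower() or 'uplink' in description.lower():
--             config_commands.append(" switchport mode trunk")
--             if vlan_id:
--                 config_commands.append(f" switchport trunk allowed vlan {vlan_id}")  # Apply VLAN filtering for trunk ports
--         else:
--             # For non-trunk ports (access ports)
--             config_commands.append(f" switchport access vlan {vlan_id}")
--             config_commands.append(f" description {description} port")
--             if is_management:
--                 config_commands.append(" switchport mode access")
--
--         config_commands.append(" no shutdown")
--         config_commands.append("exit")  # Ensure clean exit
--     return config_commands
-- ===== SOURCE B (Python) =====
-- def handle_ports(ports, vlan_id, description, switch, is_management=False):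
--     # Single character-level scan over `ports` (no split(',')): accumulate the
--     # current token and emit its command block at each comma and at the end;
--     # the trunk/access suffix is computed once up front.
--     sw = max(switch - 1, 0)
--     desc = description.lower()
--     if 'trunk' in desc or 'uplink' in desc:
--         suffix = [" switchport mode trunk"]
--         if vlan_id:
--             suffix.append(f" switchport trunk allowed vlan {vlan_id}")
--     else:
--         suffix = [f" switchport access vlan {vlan_id}",
--                   f" description {description} port"]
--         if is_management:
--             suffix.append(" switchport mode access")
--     suffix += [" no shutdown", "exit"]
--
--     out = []
--
--     def emit(tok):
--         if '-' in tok: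
--             a, b = tok.split('-')
--             out.append(f"interface range FastEthernet {sw}/{a} - {b}")
--         else:
--             out.append(f"interface FastEthernet {sw}/{tok}")
--         out.extend(suffix)
--
--     cur = ''
--     for ch in ports:
--         if ch == ',':
--             emit(cur)
--             cur = ''
--         else:
--             cur += ch
--     emit(cur)
--     return out
-- ===== Notes on version B (the rewrite author's own statement) =====
-- stated objective: alternative
-- what changed: B replaces the split-then-loop pass with a single character-level scan of `ports` that accumulates the current token and emits its command block at each comma and at end of string, with the trunk/access suffix computed once before the scan instead of re-deciding the branch per port.
import Mathlib
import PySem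

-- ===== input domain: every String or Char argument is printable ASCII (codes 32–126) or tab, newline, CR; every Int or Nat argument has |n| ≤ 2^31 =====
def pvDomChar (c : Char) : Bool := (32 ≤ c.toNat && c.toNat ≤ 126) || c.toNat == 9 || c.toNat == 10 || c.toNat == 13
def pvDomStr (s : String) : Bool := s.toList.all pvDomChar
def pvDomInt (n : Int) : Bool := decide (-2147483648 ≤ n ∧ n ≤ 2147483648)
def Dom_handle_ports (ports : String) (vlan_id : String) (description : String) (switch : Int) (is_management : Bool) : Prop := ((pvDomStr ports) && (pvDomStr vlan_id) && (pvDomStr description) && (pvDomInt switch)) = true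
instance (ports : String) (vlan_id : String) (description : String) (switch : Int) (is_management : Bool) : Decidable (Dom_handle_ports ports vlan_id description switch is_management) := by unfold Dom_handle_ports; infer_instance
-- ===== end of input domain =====

-- B replaces the split-then-loop with a single character-level scan of `ports` that emits a
-- command block at each comma and at end of string, the trunk/access suffix computed once
-- (objective: alternative).


-- ===== PORT A =====
-- the body of A's 'for port in ports.split(',')' loop, verbatim (named so the proof can speak about it)
def hpABody (vlan_id : String) (description : String) (switch2 : Int) (is_management : Bool)
    (config_commands : List String) (port : List Char) : List String :=
  let config_commands :=
    if PySem.Chars.isIn ['-'] port then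
      -- 'start_port, end_port = port.split('-')': exactly two parts under Pre_ (else Python raises ValueError); total form via getD
      let parts := PySem.Chars.splitOn port ['-']
      let start_port := parts.getD 0 []
      let end_port := parts.getD 1 []
      config_commands ++ ["interface range FastEthernet " ++ PySem.Int.toStr switch2 ++ "/" ++ String.ofList start_port ++ " - " ++ String.ofList end_port]
    else
      config_commands ++ ["interface FastEthernet " ++ PySem.Int.toStr switch2 ++ "/" ++ String.ofList port]
  let config_commands :=
    if PySem.Str.isIn "trunk" (PySem.Str.lower description) || PySem.Str.isIn "uplink" (PySem.Str.lower description) then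
      let config_commands := config_commands ++ [" switchport mode trunk"]
      if vlan_id ≠ "" then
        config_commands ++ [" switchport trunk allowed vlan " ++ vlan_id]
      else config_commands
    else
      let config_commands := config_commands ++ [" switchport access vlan " ++ vlan_id, " description " ++ description ++ " port"]
      if is_management then config_commands ++ [" switchport mode access"] else config_commands
  config_commands ++ [" no shutdown", "exit"]

def handle_ports (ports : String) (vlan_id : String) (description : String) (switch : Int) (is_management : Bool) : List String :=
  let switch1 := switch - 1
  let switch2 := if switch1 < 0 then (0 : Int) else switch1
  (PySem.Chars.splitOn ports.toList [',']).foldl (hpABody vlan_id description switch2 is_management) []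

-- ===== PORT B =====
-- the suffix list B builds once before the scan
def hpSuffix (vlan_id : String) (description : String) (is_management : Bool) : List String :=
  (if PySem.Str.isIn "trunk" (PySem.Str.lower description) || PySem.Str.isIn "uplink" (PySem.Str.lower description) then
     [" switchport mode trunk"] ++ (if vlan_id ≠ "" then [" switchport trunk allowed vlan " ++ vlan_id] else [])
   else
     [" switchport access vlan " ++ vlan_id, " description " ++ description ++ " port"]
       ++ (if is_management then [" switchport mode access"] else []))
  ++ [" no shutdown", "exit"]

-- B's emit(tok): one interface line followed by the shared suffix
def hpEmit (sw : Int) (suffix : List String) (tok : List Char) : List String :=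
  if PySem.Chars.isIn ['-'] tok then
    -- 'a, b = tok.split('-')': exactly two parts under Pre_ (else Python raises ValueError); total form via getD
    let parts := PySem.Chars.splitOn tok ['-']
    ("interface range FastEthernet " ++ PySem.Int.toStr sw ++ "/" ++ String.ofList (parts.getD 0 []) ++ " - " ++ String.ofList (parts.getD 1 [])) :: suffix
  else
    ("interface FastEthernet " ++ PySem.Int.toStr sw ++ "/" ++ String.ofList tok) :: suffix

-- B's character scan: accumulate the current token, emit at ',' and at end of string
def hpScan (sw : Int) (suffix : List String) (cur : List Char) : List Char → List String
  | [] => hpEmit sw suffix cur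
  | c :: rest =>
      if c = ',' then hpEmit sw suffix cur ++ hpScan sw suffix [] rest
      else hpScan sw suffix (cur ++ [c]) rest

def handle_ports_alt (ports : String) (vlan_id : String) (description : String) (switch : Int) (is_management : Bool) : List String :=
  let sw := max (switch - 1) 0
  let suffix := hpSuffix vlan_id description is_management
  hpScan sw suffix [] ports.toList

-- ===== PRECONDITION & SPEC =====
-- Pre_ excludes exactly the inputs where some comma-separated port piece contains two or more '-',
-- on which Python A (and B) raises ValueError at 'start_port, end_port = port.split('-')'.
def Pre_handle_ports (ports : String) (vlan_id : String) (description : String) (switch : Int) (is_management : Bool) : Prop :=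
  ∀ seg ∈ PySem.Chars.splitOn ports.toList [','], seg.count '-' ≤ 1
instance (ports : String) (vlan_id : String) (description : String) (switch : Int) (is_management : Bool) : Decidable (Pre_handle_ports ports vlan_id description switch is_management) := by unfold Pre_handle_ports; infer_instance

def pvWitness_handle_ports : String × String × String × Int × Bool := ("1-4,5", "10", "Uplink to core", 1, false)

def Spec_handle_ports (ports : String) (vlan_id : String) (description : String) (switch : Int) (is_management : Bool) (out : List String) : Prop := out = handle_ports_alt ports vlan_id description switch is_management
instance (ports : String) (vlan_id : String) (description : String) (switch : Int) (is_management : Bool) (out : List String) : Decidable (Spec_handle_ports ports vlan_id description switch is_management out) := by unfold Spec_handle_ports; infer_instance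

-- ===== CLAIM =====
def Claim_equal_handle_ports : Prop := ∀ (ports : String) (vlan_id : String) (description : String) (switch : Int) (is_management : Bool), Dom_handle_ports ports vlan_id description switch is_management → Pre_handle_ports ports vlan_id description switch is_management → Spec_handle_ports ports vlan_id description switch is_management (handle_ports ports vlan_id description switch is_management)

-- ===== LEMMAS AND PROOFS =====

-- a fuel-free, forward-accumulator characterisation of split(',')
def hpSplit (pre : List Char) : List Char → List (List Char)
  | [] => [pre]
  | c :: rest => if c = ',' then pre :: hpSplit [] rest else hpSplit (pre ++ [c]) rest

lemma splitOn_go_eq : ∀ (l : List Char) (fuel : Nat) (cur : List Char) (acc : List (List Char)),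
    l.length < fuel →
    PySem.Chars.splitOn.go [','] fuel l cur acc = acc.reverse ++ hpSplit cur.reverse l := by
  intro l
  induction l with
  | nil =>
      intro fuel cur acc h
      cases fuel with
      | zero => omega
      | succ f => simp [PySem.Chars.splitOn.go, hpSplit]
  | cons c rest ih =>
      intro fuel cur acc h
      cases fuel with
      | zero => omega
      | succ f =>
        by_cases hc : c = ','
        · subst hc
          have : PySem.Chars.splitOn.go [','] (f+1) (',' :: rest) cur acc
              = PySem.Chars.splitOn.go [','] f rest [] (cur.reverse :: acc) := by
            simp [PySem.Chars.splitOn.go, List.isPrefixOf]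
          rw [this, ih f [] (cur.reverse :: acc) (by simpa using h)]
          simp [hpSplit]
        · have : PySem.Chars.splitOn.go [','] (f+1) (c :: rest) cur acc
              = PySem.Chars.splitOn.go [','] f rest (c :: cur) acc := by
            simp only [PySem.Chars.splitOn.go, List.isPrefixOf]
            simp
            intro h'; exact absurd h'.symm hc
          rw [this, ih f (c :: cur) acc (by simpa using h)]
          simp [hpSplit, hc]

lemma splitOn_eq_hpSplit (s : List Char) :
    PySem.Chars.splitOn s [','] = hpSplit [] s := by
  have := splitOn_go_eq s (s.length + 1) [] [] (by omega)
  simpa [PySem.Chars.splitOn] using this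

-- B's scan emits exactly one block per hpSplit segment
lemma hpScan_eq (sw : Int) (suffix : List String) :
    ∀ (l cur : List Char),
    hpScan sw suffix cur l = (hpSplit cur l).flatMap (hpEmit sw suffix) := by
  intro l
  induction l with
  | nil => intro cur; simp [hpScan, hpSplit]
  | cons c rest ih =>
      intro cur
      by_cases hc : c = ','
      · subst hc; simp [hpScan, hpSplit, ih]
      · simp [hpScan, hpSplit, hc, ih]

-- A's loop body appends exactly B's per-segment block
lemma hpABody_eq (vlan_id description : String) (sw : Int) (is_management : Bool)
    (acc : List String) (port : List Char) :
    hpABody vlan_id description sw is_management acc port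
      = acc ++ hpEmit sw (hpSuffix vlan_id description is_management) port := by
  unfold hpABody hpEmit hpSuffix
  split_ifs <;> simp

-- ===== VERDICT =====
theorem handle_ports_spec : Claim_equal_handle_ports := by
  intro ports vlan_id description switch is_management _ _
  show handle_ports ports vlan_id description switch is_management = handle_ports_alt ports vlan_id description switch is_management
  simp only [handle_ports, handle_ports_alt]
  rw [show (if switch - 1 < 0 then (0 : Int) else switch - 1) = max (switch - 1) 0 by omega]
  rw [show hpABody vlan_id description (max (switch - 1) 0) is_management =
      (fun acc port => acc ++ hpEmit (max (switch - 1) 0) (hpSuffix vlan_id description is_management) port)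
    from funext fun acc => funext fun port => hpABody_eq vlan_id description (max (switch - 1) 0) is_management acc port]
  rw [PySem.List.foldl_append_eq_flatMap]
  rw [splitOn_eq_hpSplit, hpScan_eq]
  simp
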